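-- pv_equiv track=rewrite | github.com/starrye/LeetCode | all_topic/esay_topic/面试题13.机器人的运动范围 200408.py | sum_rc
-- ===== SOURCE A (Python) =====
-- def sum_rc(row, col):
--     sum = 0
--     while row > 0:
--         sum += row % 10
--         row //= 10
--     while col > 0:
--         sum += col % 10
--         col //= 10
--     return sum
-- ===== SOURCE B (Python) =====
-- def _digsum(n):
--     if n <= 0:
--         return 0
--     return sum(ord(ch) - 48 for ch in str(n))
--
-- def sum_rc(row, col):
--     return _digsum(row) + _digsum(col)
-- ===== Notes on version B (the rewrite author's own statement) =====
-- stated objective: simpler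
-- what changed: Replaces the two mod/div while-loops with a single helper that sums the decimal-string digits of each number (non-positive numbers contribute 0, as in A).
import Mathlib
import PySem

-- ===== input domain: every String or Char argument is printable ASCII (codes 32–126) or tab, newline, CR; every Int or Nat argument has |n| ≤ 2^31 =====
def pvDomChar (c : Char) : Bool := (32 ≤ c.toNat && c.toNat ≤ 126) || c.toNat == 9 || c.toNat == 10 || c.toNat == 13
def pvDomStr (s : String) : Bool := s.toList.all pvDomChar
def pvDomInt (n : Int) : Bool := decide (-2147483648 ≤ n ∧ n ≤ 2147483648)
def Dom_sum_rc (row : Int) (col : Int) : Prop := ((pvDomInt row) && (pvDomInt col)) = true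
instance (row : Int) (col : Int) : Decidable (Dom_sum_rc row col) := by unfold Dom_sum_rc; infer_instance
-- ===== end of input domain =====

-- B replaces A's two mod/div while-loops with a digit sum over each number's decimal string; objective: simpler.

-- ===== PORT A =====
-- 'while n > 0: sum += n % 10; n //= 10' as structural recursion on the accumulator pair
def sumRcLoop (s : Int) (n : Int) : Int :=
  if 0 < n then
    sumRcLoop (s + PySem.Int.mod n 10) (PySem.Int.floordiv n 10)
  else s
termination_by n.toNat
decreasing_by
  have h10 : PySem.Int.floordiv n 10 < n := by
    rw [PySem.Int.floordiv_lt_iff_lt_mul (by omega : (0:Int) < 10)]; omega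
  omega

def sum_rc (row : Int) (col : Int) : Int :=
  sumRcLoop (sumRcLoop 0 row) col

-- ===== PORT B =====
-- sum(ord(ch) - 48 for ch in str(n)) guarded by n <= 0
def digsumAlt (n : Int) : Int :=
  if n ≤ 0 then 0
  else ((PySem.Int.toChars n).map (fun c => (c.toNat : Int) - 48)).sum

def sum_rc_alt (row : Int) (col : Int) : Int :=
  digsumAlt row + digsumAlt col

-- ===== PRECONDITION & SPEC =====
def Spec_sum_rc (row : Int) (col : Int) (out : Int) : Prop := out = sum_rc_alt row col
instance (row : Int) (col : Int) (out : Int) : Decidable (Spec_sum_rc row col out) := by unfold Spec_sum_rc; infer_instance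

-- ===== CLAIM (what is proved, stated in full; the proofs are below) =====
def Claim_equal_sum_rc : Prop := ∀ (row : Int) (col : Int), Dom_sum_rc row col → Spec_sum_rc row col (sum_rc row col)

-- ===== LEMMAS AND PROOFS =====

-- reference digit sum on Nat
def dsum (n : Nat) : Nat :=
  if n = 0 then 0 else n % 10 + dsum (n / 10)
decreasing_by exact Nat.div_lt_self (by omega) (by omega)

def charSum (cs : List Char) : Int := (cs.map (fun c => (c.toNat : Int) - 48)).sum

theorem charSum_digitChar (m : Nat) (h : m < 10) :
    ((Nat.digitChar m).toNat : Int) - 48 = (m : Int) := by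
  interval_cases m <;> decide

theorem charSum_cons (c : Char) (ds : List Char) :
    charSum (c :: ds) = ((c.toNat : Int) - 48) + charSum ds := by
  simp [charSum]

theorem dsum_zero : dsum 0 = 0 := by rw [dsum]; simp

theorem dsum_step (n : Nat) : dsum n = n % 10 + dsum (n / 10) := by
  by_cases h : n = 0
  · subst h; simp [dsum_zero]
  · rw [dsum, if_neg h]

theorem charSum_toDigitsCore (fuel : Nat) :
    ∀ (n : Nat) (ds : List Char), n < fuel →
      charSum (Nat.toDigitsCore 10 fuel n ds) = (dsum n : Int) + charSum ds := by
  induction fuel with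
  | zero => intro n ds h; omega
  | succ fuel ih =>
    intro n ds h
    rw [Nat.toDigitsCore]
    by_cases h0 : n / 10 = 0
    · rw [if_pos h0, charSum_cons, charSum_digitChar _ (Nat.mod_lt _ (by omega)),
         dsum_step n, h0, dsum_zero]
      push_cast; ring
    · rw [if_neg h0]
      have hlt : n / 10 < fuel := by
        have := Nat.div_lt_self (n := n) (by omega) (show 1 < 10 by omega)
        omega
      rw [ih _ _ hlt, charSum_cons, charSum_digitChar _ (Nat.mod_lt _ (by omega)),
         dsum_step n]
      push_cast; ring

theorem digsumAlt_eq (n : Int) : digsumAlt n = if 0 < n then (dsum n.toNat : Int) else 0 := by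
  by_cases hn : 0 < n
  · rw [digsumAlt, if_neg (by omega), if_pos hn]
    have : PySem.Int.toChars n = Nat.toDigits 10 n.toNat := by
      rw [PySem.Int.toChars, if_neg (by omega)]
    rw [show ((PySem.Int.toChars n).map (fun c => (c.toNat : Int) - 48)).sum
          = charSum (PySem.Int.toChars n) from rfl, this, Nat.toDigits]
    rw [charSum_toDigitsCore (n.toNat + 1) n.toNat [] (by omega)]
    simp [charSum]
  · rw [digsumAlt, if_pos (by omega), if_neg hn]

theorem sumRcLoop_eq (k : Nat) : ∀ (s n : Int), n.toNat ≤ k →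
    sumRcLoop s n = s + (if 0 < n then (dsum n.toNat : Int) else 0) := by
  induction k with
  | zero =>
    intro s n hk
    rw [sumRcLoop]
    have h : ¬ 0 < n := by omega
    simp [h]
  | succ k ih =>
    intro s n hk
    rw [sumRcLoop]
    by_cases hn : 0 < n
    · rw [if_pos hn, if_pos hn]
      have hm : PySem.Int.mod n 10 = ((n.toNat % 10 : Nat) : Int) := by
        simp [pysem]; omega
      have hd : PySem.Int.floordiv n 10 = ((n.toNat / 10 : Nat) : Int) := by
        simp [pysem]; omega
      have hkk : (((n.toNat / 10 : Nat) : Int)).toNat ≤ k := by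
        have := Nat.div_lt_self (n := n.toNat) (by omega) (show 1 < 10 by omega)
        omega
      rw [hm, hd, ih _ _ hkk, dsum_step n.toNat]
      by_cases h0 : 0 < ((n.toNat / 10 : Nat) : Int)
      · rw [if_pos h0]
        simp only [Int.toNat_natCast]
        push_cast; ring
      · rw [if_neg h0]
        have hz : n.toNat / 10 = 0 := by omega
        rw [hz, dsum_zero]
        push_cast; ring
    · rw [if_neg hn, if_neg hn]; ring

-- ===== VERDICT (by name: the statement is the Claim_ definition above) =====
theorem sum_rc_spec : Claim_equal_sum_rc := by
  intro row col _
  show sum_rc row col = sum_rc_alt row col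
  rw [sum_rc, sum_rc_alt,
      sumRcLoop_eq row.toNat 0 row (le_refl _),
      sumRcLoop_eq col.toNat _ col (le_refl _),
      digsumAlt_eq, digsumAlt_eq]
  ring
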